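-- pv_equiv track=rewrite | github.com/vals/umis | umis/barcodes.py | mutationhash
-- ===== SOURCE A (Python) =====
-- import itertools
-- from collections import defaultdict
--
-- def mutationhash(strings, nedit):
--     """
--     produce a hash with each key a nedit distance substitution for a set of
--     strings. values of the hash is the set of strings the substitution could
--     have come from
--     """
--     maxlen = max([len(string) for string in strings])
--     indexes = generate_idx(maxlen, nedit)
--     muthash = defaultdict(set)
--     for string in strings:
--         muthash[string].update([string])
--         for x in substitution_set(string, indexes):
--             muthash[x].update([string])
--     return muthash
--
-- def substitution_set(string, indexes):
--     """
--     for a string, return a set of all possible substitutions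
--     """
--     strlen = len(string)
--     return {mutate_string(string, x) for x in indexes if valid_substitution(strlen, x)}
--
-- def valid_substitution(strlen, index):
--     """
--     skip performing substitutions that are outside the bounds of the string
--     """
--     values = index[0]
--     return all([strlen > i for i in values])
--
-- def generate_idx(maxlen, nedit):
--     """
--     generate all possible nedit edits of a string. each item has the form
--     ((index1, index2), 'A', 'G')  for nedit=2
--     index1 will be replaced by 'A', index2 by 'G'
--
--     this covers all edits < nedit as well since some of the specified
--     substitutions will not change the base
--     """
--     ALPHABET = ["A", "C", "G", "T"]
--     indexlists = []
--     ALPHABETS = [ALPHABET for x in range(nedit)]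
--     return list(itertools.product(itertools.combinations(range(maxlen), nedit),
--                                   *ALPHABETS))
--
-- def mutate_string(string, tomutate):
--     strlist = list(string)
--     for i, idx in enumerate(tomutate[0]):
--         strlist[idx] = tomutate[i+1]
--     return "".join(strlist)
-- ===== SOURCE B (Python) =====
-- import itertools
-- from collections import defaultdict
--
-- def mutationhash(strings, nedit):
--     # Per-string direct generation: combinations over the string's own index range
--     # and product over replacement letters, mutating in place -- no global index
--     # table over maxlen and no per-string validity filtering.
--     maxlen = max(len(string) for string in strings)  # keeps ValueError on empty input
--     muthash = defaultdict(set)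
--     for string in strings:
--         muthash[string].add(string)
--         chars = list(string)
--         subs = set()
--         for positions in itertools.combinations(range(len(string)), nedit):
--             for letters in itertools.product("ACGT", repeat=nedit):
--                 mutated = chars[:]
--                 for pos, letter in zip(positions, letters):
--                     mutated[pos] = letter
--                 subs.add("".join(mutated))
--         for x in subs:
--             muthash[x].add(string)
--     return muthash
-- ===== Notes on version B (the rewrite author's own statement) =====
-- stated objective: alternative
-- what changed: Drops the global generate_idx table over maxlen and the per-string valid_substitution filter; each string's substitution set is generated directly from combinations of its own index range and product over replacement letters, mutating the character list in place.
import Mathlib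
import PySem

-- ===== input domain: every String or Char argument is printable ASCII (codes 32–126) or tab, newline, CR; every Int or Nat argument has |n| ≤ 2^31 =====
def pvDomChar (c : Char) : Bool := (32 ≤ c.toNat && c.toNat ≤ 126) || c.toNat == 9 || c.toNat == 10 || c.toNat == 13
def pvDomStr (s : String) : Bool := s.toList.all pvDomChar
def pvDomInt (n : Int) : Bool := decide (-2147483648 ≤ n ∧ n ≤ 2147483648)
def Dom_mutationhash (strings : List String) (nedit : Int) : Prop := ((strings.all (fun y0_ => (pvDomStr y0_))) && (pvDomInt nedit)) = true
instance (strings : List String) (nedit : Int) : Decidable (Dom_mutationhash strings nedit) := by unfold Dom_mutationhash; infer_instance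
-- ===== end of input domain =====

-- B drops A's global generate_idx table over maxlen and its per-string valid_substitution
-- filter: each string directly enumerates combinations of its own index range and the
-- replacement-letter tuples, accumulating into the dict (objective: alternative decomposition).

-- ===== PORT A =====
-- itertools.combinations(l, k) in lexicographic order (shared library helper; both Pythons call itertools)
def pvCombinations : List Nat → Nat → List (List Nat)
  | _, 0 => [[]]
  | [], _ + 1 => []
  | x :: xs, k + 1 => (pvCombinations xs k).map (fun c => x :: c) ++ pvCombinations xs (k + 1)

-- itertools.product(ALPHABET, repeat=k): leftmost factor varies slowest
def pvLetterTuples : Nat → List (List Char)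
  | 0 => [[]]
  | k + 1 => (['A', 'C', 'G', 'T'] : List Char).flatMap (fun a => (pvLetterTuples k).map (fun t => a :: t))

-- generate_idx: product(combinations(range(maxlen), nedit), *ALPHABETS)
def pvGenerateIdx (maxlen k : Nat) : List (List Nat × List Char) :=
  (pvCombinations (List.range maxlen) k).flatMap (fun c => (pvLetterTuples k).map (fun t => (c, t)))

-- mutate_string: strlist[idx] = tomutate[i+1] for each position (index always in range when valid)
def pvMutateString (s : List Char) (p : List Nat × List Char) : List Char :=
  (p.1.zip p.2).foldl (fun acc q => PySem.List.pySetD acc (q.1 : Int) q.2) s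

-- valid_substitution
def pvValidSubstitution (strlen : Nat) (p : List Nat × List Char) : Bool :=
  p.1.all (fun i => decide (i < strlen))

-- substitution_set: a Python set comprehension (first occurrences, comprehension order)
def pvSubstitutionSet (s : List Char) (indexes : List (List Nat × List Char)) : PySem.Set String :=
  PySem.Set.ofList ((indexes.filter (fun p => pvValidSubstitution s.length p)).map
      (fun p => String.mk (pvMutateString s p)))

-- muthash[key].update([src]) on a defaultdict(set)
def pvUpd (d : PySem.Dict String (PySem.Set String)) (key src : String) :
    PySem.Dict String (PySem.Set String) :=
  d.insert key (PySem.Set.add (d.getD key PySem.Set.empty) src)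

def mutationhash (strings : List String) (nedit : Int) : List (String × List String) :=
  match PySem.List.max? (strings.map (fun s => s.toList.length)) (fun x => x) with
  | none => []   -- max([]) raises ValueError in Python; excluded by Pre_
  | some maxlen =>
    let indexes := pvGenerateIdx maxlen nedit.toNat   -- nedit < 0 raises in Python; excluded by Pre_
    (strings.foldl (fun d s =>
        let d1 := pvUpd d s s
        (pvSubstitutionSet s.toList indexes).foldl (fun d2 x => pvUpd d2 x s) d1)
      PySem.Dict.empty).items

-- ===== PORT B =====
def mutationhash_alt (strings : List String) (nedit : Int) : List (String × List String) :=
  match PySem.List.max? (strings.map (fun s => s.toList.length)) (fun x => x) with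
  | none => []   -- max() raises ValueError on empty input; excluded by Pre_
  | some _ =>
    let k := nedit.toNat   -- nedit < 0 raises in Python; excluded by Pre_
    (strings.foldl (fun d s =>
        let d1 := pvUpd d s s
        let subs : PySem.Set String :=
          (pvCombinations (List.range s.toList.length) k).foldl (fun acc c =>
            (pvLetterTuples k).foldl (fun acc2 t =>
                PySem.Set.add acc2 (String.mk ((c.zip t).foldl
                    (fun a q => PySem.List.pySetD a (q.1 : Int) q.2) s.toList)))
              acc)
            PySem.Set.empty
        subs.foldl (fun d2 x => pvUpd d2 x s) d1)
      PySem.Dict.empty).items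

-- ===== PRECONDITION & SPEC =====
-- Python raises on empty `strings` (ValueError from max) and on negative nedit (ValueError
-- from itertools.combinations); exactly those inputs are excluded.
def Pre_mutationhash (strings : List String) (nedit : Int) : Prop := strings ≠ [] ∧ 0 ≤ nedit
instance (strings : List String) (nedit : Int) : Decidable (Pre_mutationhash strings nedit) := by
  unfold Pre_mutationhash; infer_instance

def pvWitness_mutationhash : List String × Int := (["AC", "G"], 1)

def Spec_mutationhash (strings : List String) (nedit : Int) (out : List (String × List String)) : Prop := out = mutationhash_alt strings nedit
instance (strings : List String) (nedit : Int) (out : List (String × List String)) : Decidable (Spec_mutationhash strings nedit out) := by unfold Spec_mutationhash; infer_instance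

-- ===== CLAIM (what is proved, stated in full; the proofs are below) =====
def Claim_equal_mutationhash : Prop := ∀ (strings : List String) (nedit : Int), Dom_mutationhash strings nedit → Pre_mutationhash strings nedit → Spec_mutationhash strings nedit (mutationhash strings nedit)

-- ===== LEMMAS AND PROOFS =====

-- a nested fold over (xs, ys) is a fold over the flattened product
theorem pvFoldl_nested {α β γ D : Type} (xs : List α) (ys : List β) (f : α → β → γ)
    (g : D → γ → D) :
    ∀ d : D, xs.foldl (fun d c => ys.foldl (fun d' y => g d' (f c y)) d) d
      = (xs.flatMap (fun c => ys.map (f c))).foldl g d := by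
  induction xs with
  | nil => intro d; rfl
  | cons c xs ih => intro d; simp [List.foldl_append, List.foldl_map, ih]

-- a flatMap guarded by a condition on the outer element is a flatMap over the filtered list
theorem pvFlatMap_if {α β : Type} (xs : List α) (g : α → List β) (q : α → Bool) :
    xs.flatMap (fun c => if q c then g c else []) = (xs.filter q).flatMap g := by
  induction xs with
  | nil => rfl
  | cons x xs ih => by_cases hx : q x <;> simp [hx, ih]

-- filtering combinations by an elementwise predicate = combinations of the filtered list
theorem pvComb_filter (P : Nat → Bool) (l : List Nat) :
    ∀ k, (pvCombinations l k).filter (fun c => c.all P) = pvCombinations (l.filter P) k := by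
  induction l with
  | nil => intro k; cases k <;> simp [pvCombinations]
  | cons x xs ih =>
    intro k
    cases k with
    | zero => by_cases hx : P x <;> simp [pvCombinations, hx]
    | succ k =>
      by_cases hx : P x
      · rw [pvCombinations, List.filter_append, List.filter_map, List.filter_cons_of_pos hx,
          pvCombinations]
        have h1 : List.filter ((fun c => c.all P) ∘ (fun c => x :: c)) (pvCombinations xs k)
            = List.filter (fun c => c.all P) (pvCombinations xs k) :=
          List.filter_congr (fun c _ => by simp [hx])
        rw [h1, ih k, ih (k + 1)]
      · rw [pvCombinations, List.filter_append, List.filter_map, List.filter_cons_of_neg hx]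
        have h1 : List.filter ((fun c => c.all P) ∘ (fun c => x :: c)) (pvCombinations xs k)
            = [] :=
          List.filter_eq_nil_iff.mpr (fun c _ => by simp [hx])
        rw [h1]
        simp [ih (k + 1)]

theorem pvRange_filter (m n : Nat) (h : m ≤ n) :
    (List.range n).filter (fun i => decide (i < m)) = List.range m := by
  induction n with
  | zero =>
    have : m = 0 := Nat.le_zero.mp h
    subst this; rfl
  | succ n ih =>
    rcases Nat.lt_or_ge n m with hnm | hnm
    · have hm : m = n + 1 := by omega
      subst hm
      apply List.filter_eq_self.mpr
      intro a ha
      simp [List.mem_range] at ha ⊢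
      omega
    · rw [List.range_succ, List.filter_append, ih hnm]
      simp [Nat.not_lt.mpr hnm]

-- A's per-string filtered-and-mutated index list IS B's direct generation list
theorem pvListShape (s : List Char) (k maxlen : Nat) (h : s.length ≤ maxlen) :
    ((pvGenerateIdx maxlen k).filter (fun p => pvValidSubstitution s.length p)).map
        (fun p => String.mk (pvMutateString s p))
      = (pvCombinations (List.range s.length) k).flatMap
          (fun c => (pvLetterTuples k).map (fun t => String.mk (pvMutateString s (c, t)))) := by
  rw [pvGenerateIdx, List.filter_flatMap]
  have step : ∀ c : List Nat,
      ((pvLetterTuples k).map (fun t => (c, t))).filter (fun p => pvValidSubstitution s.length p)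
        = if c.all (fun i => decide (i < s.length)) then (pvLetterTuples k).map (fun t => (c, t))
          else [] := by
    intro c
    by_cases hc : c.all (fun i => decide (i < s.length))
    · rw [if_pos hc]
      apply List.filter_eq_self.mpr
      intro p hp
      obtain ⟨t, _, rfl⟩ := List.mem_map.mp hp
      exact hc
    · rw [if_neg hc, List.filter_eq_nil_iff.mpr]
      intro p hp
      obtain ⟨t, _, rfl⟩ := List.mem_map.mp hp
      exact hc
  rw [List.flatMap_congr (fun c _ => step c)]
  rw [pvFlatMap_if, pvComb_filter, pvRange_filter s.length maxlen h, List.map_flatMap]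
  apply List.flatMap_congr
  intro c _
  rw [List.map_map]
  rfl

-- the per-string substitution sets of the two programs are the same Python set
theorem pvInner_set_eq (s : String) (k maxlen : Nat) (h : s.toList.length ≤ maxlen) :
    pvSubstitutionSet s.toList (pvGenerateIdx maxlen k)
      = (pvCombinations (List.range s.toList.length) k).foldl (fun acc c =>
          (pvLetterTuples k).foldl (fun acc2 t =>
              PySem.Set.add acc2 (String.mk ((c.zip t).foldl
                  (fun a q => PySem.List.pySetD a (q.1 : Int) q.2) s.toList)))
            acc)
          PySem.Set.empty := by
  rw [show (fun (acc : PySem.Set String) (c : List Nat) =>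
        (pvLetterTuples k).foldl (fun acc2 t =>
            PySem.Set.add acc2 (String.mk ((c.zip t).foldl
                (fun a q => PySem.List.pySetD a (q.1 : Int) q.2) s.toList))) acc)
      = fun acc c => (pvLetterTuples k).foldl (fun acc2 t =>
            PySem.Set.add acc2 (String.mk (pvMutateString s.toList (c, t)))) acc from rfl,
    pvFoldl_nested (pvCombinations (List.range s.toList.length) k) (pvLetterTuples k)
      (fun c t => String.mk (pvMutateString s.toList (c, t))) PySem.Set.add PySem.Set.empty,
    pvSubstitutionSet, pvListShape s.toList k maxlen h, PySem.Set.ofList_eq_foldl]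
  rfl

-- ===== VERDICT (by name: the statement is the Claim_ definition above) =====
theorem mutationhash_spec : Claim_equal_mutationhash := by
  intro strings nedit _dom _pre
  unfold Spec_mutationhash mutationhash mutationhash_alt
  cases hmax : PySem.List.max? (strings.map (fun s => s.toList.length)) (fun x => x) with
  | none => rfl
  | some maxlen =>
    simp only
    congr 1
    apply PySem.List.foldl_congr_mem
    intro acc s hs
    have hlen : s.toList.length ≤ maxlen :=
      PySem.List.max?_isMax hmax s.toList.length (List.mem_map.mpr ⟨s, hs, rfl⟩)
    rw [pvInner_set_eq s nedit.toNat maxlen hlen]
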